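-- pv_equiv track=rewrite | github.com/SewoongPark/CodingTest_rep | 프로그래머스/1/12917. 문자열 내림차순으로 배치하기/문자열 내림차순으로 배치하기.py | solution
-- ===== SOURCE A (Python) =====
-- def solution(s):
--     answer = ''
--     lowers, uppers = '', ''
--
--     for alp in s:
--         if alp == alp.lower():
--             lowers = sorted(s, reverse = True)
--     answer = "".join(lowers)
--     return answer
-- ===== SOURCE B (Python) =====
-- def solution(s):
--     counts = [0] * 128
--     for c in s:
--         counts[ord(c)] += 1
--     return ''.join(chr(code) * counts[code] for code in range(127, -1, -1))
-- ===== Notes on version B (the rewrite author's own statement) =====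
-- stated objective: faster
-- what changed: B replaces A's loop that re-runs a full comparison sort of the string for every non-uppercase character with a single counting pass over an ASCII frequency table and a sortless descending reconstruction.
-- intended difference: On nonempty strings made only of uppercase ASCII letters, the lowercase guard in A never fires so A returns an empty result; B returns the characters sorted in descending order, which is the intended value for a descending-sort function. — e.g. on solution("AB"): A returns "", B returns "BA"
import Mathlib
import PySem

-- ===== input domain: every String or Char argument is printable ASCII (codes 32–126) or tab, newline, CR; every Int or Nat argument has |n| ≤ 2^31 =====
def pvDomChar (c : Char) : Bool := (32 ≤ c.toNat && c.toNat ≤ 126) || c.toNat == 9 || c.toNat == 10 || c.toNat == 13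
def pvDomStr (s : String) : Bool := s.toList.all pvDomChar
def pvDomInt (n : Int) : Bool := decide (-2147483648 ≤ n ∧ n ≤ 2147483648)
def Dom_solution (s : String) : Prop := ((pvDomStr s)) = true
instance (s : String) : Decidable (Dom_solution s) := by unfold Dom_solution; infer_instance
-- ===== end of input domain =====

-- B sorts the string descending by one counting pass over an ASCII frequency table (no comparison
-- sort); faster, and it returns the sorted string on all-uppercase inputs where A returns an empty result.

-- ===== PORT A =====
-- for alp in s: if alp == alp.lower(): lowers = sorted(s, reverse=True); return "".join(lowers)
-- (alp is a one-character string; on the ASCII domain alp.lower() is exactly lowerChar alp)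
def solution (s : String) : String :=
  let lowers : List Char := s.toList.foldl
    (fun (lowers : List Char) alp =>
      if alp == PySem.Chars.lowerChar alp then PySem.List.sorted s.toList (fun c => c) true else lowers)
    []
  String.ofList (PySem.Chars.join [] (lowers.map (fun c => [c])))

-- ===== PORT B =====
-- counts = [0]*128; for c in s: counts[ord(c)] += 1; ''.join(chr(code)*counts[code] for code in range(127,-1,-1))
def solution_alt (s : String) : String :=
  let counts : List Nat := s.toList.foldl
    (fun (counts : List Nat) c => counts.set c.toNat (counts.getD c.toNat 0 + 1))
    (List.replicate 128 0)
  String.ofList (PySem.Chars.join []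
    ((PySem.List.pyRange 127 (-1) (-1)).map
      (fun code => List.replicate (counts.getD code.toNat 0) (Char.ofNat code.toNat))))

-- ===== PRECONDITION & SPEC =====
-- On nonempty strings made only of uppercase ASCII letters, the lowercase guard in A never fires
-- so A returns an empty result; B returns the characters sorted descending, the intended value
-- for a descending-sort function.
def D_solution (s : String) : Prop :=
  s.toList ≠ [] ∧ s.toList.all (fun c => 65 ≤ c.toNat && c.toNat ≤ 90) = true
instance (s : String) : Decidable (D_solution s) := by unfold D_solution; infer_instance
def Spec_solution (s : String) (out : String) : Prop := ¬ D_solution s → out = solution_alt s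
instance (s : String) (out : String) : Decidable (Spec_solution s out) := by unfold Spec_solution; infer_instance
def pvDiffWitness_solution : String := "AB"
def pvDiffWitnessOut_solution : String × String := ("", "BA")

-- ===== CLAIM (what is proved, stated in full; the proofs are below) =====
def Claim_unchanged_solution : Prop := ∀ (s : String), Dom_solution s → Spec_solution s (solution s)
def Claim_changed_solution : Prop := Dom_solution (pvDiffWitness_solution) ∧ D_solution (pvDiffWitness_solution) ∧ solution (pvDiffWitness_solution) = pvDiffWitnessOut_solution.1 ∧ solution_alt (pvDiffWitness_solution) = pvDiffWitnessOut_solution.2 ∧ pvDiffWitnessOut_solution.1 ≠ pvDiffWitnessOut_solution.2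
def Claim_exact_solution : Prop := ∀ (s : String), Dom_solution s → D_solution s → solution s ≠ solution_alt s

-- ===== LEMMAS AND PROOFS =====

-- the character of an ASCII code
lemma toNat_charOfNat (n : Nat) (h : n ≤ 127) : (Char.ofNat n).toNat = n := by
  have hv : Nat.isValidChar n := Or.inl (by omega)
  simp [Char.ofNat, hv, Char.toNat, Char.ofNatAux]

lemma join_nil_flatten (L : List (List Char)) : PySem.Chars.join [] L = L.flatten := by
  induction L with
  | nil => rfl
  | cons x t ih =>
    cases t with
    | nil => simp [PySem.Chars.join, List.intercalate]
    | cons y u =>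
      simp only [PySem.Chars.join, List.intercalate] at ih ⊢
      simp_all [List.intersperse]

-- a Dom character compared with its Python lowercase: equal iff it is not an uppercase letter
lemma lowerChar_eq_iff (c : Char) (hd : pvDomChar c = true) :
    (c == PySem.Chars.lowerChar c) = true ↔ ¬ (65 ≤ c.toNat ∧ c.toNat ≤ 90) := by
  have hb : c.toNat ≤ 126 := by simp [pvDomChar] at hd; omega
  unfold PySem.Chars.lowerChar PySem.Chars.isupper
  by_cases hu : 65 ≤ c.toNat ∧ c.toNat ≤ 90
  · have h1 : ('A' ≤ c) := by simpa [Char.le_def] using hu.1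
    have h2 : (c ≤ 'Z') := by simpa [Char.le_def] using hu.2
    simp only [h1, h2, decide_true, Bool.and_self, if_true]
    constructor
    · intro h
      have := congrArg Char.toNat (beq_iff_eq.mp h)
      rw [toNat_charOfNat (c.toNat + 32) (by omega)] at this
      omega
    · intro h; exact absurd hu h
  · have hne : ¬ ('A' ≤ c ∧ c ≤ 'Z') := by
      intro ⟨h1, h2⟩
      exact hu ⟨Char.le_def.mp h1, Char.le_def.mp h2⟩
    have : (decide ('A' ≤ c) && decide (c ≤ 'Z')) = false := by
      by_cases h1 : 'A' ≤ c <;> by_cases h2 : c ≤ 'Z' <;> simp_all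
    simp [this, hu]

-- A's loop: if no element satisfies p the accumulator is never touched
lemma foldl_if_false {α β : Type} (l : List α) (p : α → Bool) (v : β) (init : β)
    (h : ∀ a ∈ l, p a = false) :
    l.foldl (fun acc x => if p x then v else acc) init = init := by
  induction l generalizing init with
  | nil => rfl
  | cons a t ih =>
    have ha := h a (List.mem_cons_self ..)
    have ht : ∀ x ∈ t, p x = false := fun x hx => h x (List.mem_cons_of_mem _ hx)
    simp only [List.foldl_cons]
    rw [if_neg (by simp [ha])]
    exact ih init ht

lemma foldl_if_abs {α β : Type} (l : List α) (p : α → Bool) (v : β) :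
    l.foldl (fun acc x => if p x then v else acc) v = v := by
  induction l with
  | nil => rfl
  | cons a t ih => by_cases h : p a = true <;> simp [List.foldl, h, ih]

lemma foldl_if_true {α β : Type} (l : List α) (p : α → Bool) (v : β) (init : β)
    (h : ∃ a ∈ l, p a = true) :
    l.foldl (fun acc x => if p x then v else acc) init = v := by
  induction l generalizing init with
  | nil => simp at h
  | cons a t ih =>
    by_cases ha : p a = true
    · simp [List.foldl, ha, foldl_if_abs]
    · obtain ⟨b, hb, hpb⟩ := h
      rcases List.mem_cons.mp hb with hb' | hb'
      · exact absurd (hb' ▸ hpb) ha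
      · simp only [List.foldl_cons]
        rw [if_neg (by simp [ha])]
        exact ih init ⟨b, hb', hpb⟩

-- B's counting loop
def pvCountFold (cs : List Char) (init : List Nat) : List Nat :=
  cs.foldl (fun (counts : List Nat) c => counts.set c.toNat (counts.getD c.toNat 0 + 1)) init

lemma getD_set_nat (l : List Nat) (i v k : Nat) :
    (l.set i v).getD k 0 = if i = k ∧ i < l.length then v else l.getD k 0 := by
  simp only [List.getD, List.getElem?_set]
  split_ifs with h <;> simp_all
  omega

lemma pvCountFold_getD (cs : List Char) (init : List Nat) (hlen : init.length = 128)
    (hdom : ∀ c ∈ cs, c.toNat < 128) (k : Nat) :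
    (pvCountFold cs init).getD k 0 = init.getD k 0 + cs.countP (fun c => c.toNat == k) := by
  induction cs generalizing init with
  | nil => simp [pvCountFold]
  | cons c t ih =>
    have hc := hdom c (List.mem_cons_self ..)
    have ht : ∀ x ∈ t, x.toNat < 128 := fun x hx => hdom x (List.mem_cons_of_mem _ hx)
    have hlen' : (init.set c.toNat (init.getD c.toNat 0 + 1)).length = 128 := by
      simp [hlen]
    simp only [pvCountFold, List.foldl_cons] at ih ⊢
    rw [ih _ hlen' ht, List.countP_cons, getD_set_nat]
    by_cases hck : c.toNat = k
    · simp [hck, hlen, hck ▸ hc]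
      omega
    · simp [hck, hlen]

-- counts from the zero table = occurrence count in cs
lemma pvCountFold_zero (cs : List Char) (hdom : ∀ c ∈ cs, c.toNat < 128) (k : Nat) (hk : k ≤ 127) :
    (pvCountFold cs (List.replicate 128 0)).getD k 0 = PySem.List.count cs (Char.ofNat k) := by
  rw [pvCountFold_getD cs _ (by simp) hdom k]
  have h0 : (List.replicate 128 (0 : Nat)).getD k 0 = 0 := by
    simp only [List.getD, List.getElem?_replicate]
    split <;> simp
  rw [h0, Nat.zero_add]
  have : PySem.List.count cs (Char.ofNat k) = cs.countP (fun c => c == Char.ofNat k) := by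
    simp [PySem.List.count, List.count]
  rw [this]
  apply List.countP_congr
  intro c hc
  have hcb := hdom c hc
  constructor
  · intro h
    have : c.toNat = k := by simpa using h
    simp [← this, Char.ofNat_toNat]
  · intro h
    have : c = Char.ofNat k := by simpa using h
    simp [this, toNat_charOfNat k hk]

-- shorthand for the flattened run blocks, by occurrence count
def pvBlocks (cs : List Char) (codes : List Int) : List Char :=
  (codes.map (fun code => List.replicate (PySem.List.count cs (Char.ofNat code.toNat)) (Char.ofNat code.toNat))).flatten

lemma count_pvBlocks (cs : List Char) (codes : List Int)
    (hnd : (codes.map (fun code => Char.ofNat code.toNat)).Nodup) (a : Char) :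
    (pvBlocks cs codes).count a
      = if a ∈ codes.map (fun code => Char.ofNat code.toNat) then cs.count a else 0 := by
  induction codes with
  | nil => simp [pvBlocks]
  | cons c t ih =>
    simp only [List.map_cons, List.nodup_cons] at hnd
    have ih' := ih hnd.2
    simp only [pvBlocks, List.map_cons, List.flatten_cons, List.count_append] at ih' ⊢
    rw [ih', List.count_replicate]
    by_cases hac : a = Char.ofNat c.toNat
    · have hnotin : a ∉ t.map (fun code => Char.ofNat code.toNat) := hac ▸ hnd.1
      subst hac
      simp [PySem.List.count, hnotin]
    · simp [List.mem_cons, hac, Ne.symm hac, beq_iff_eq]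

lemma char_le_of_toNat_le {a b : Char} (h : a.toNat ≤ b.toNat) : a ≤ b := Char.le_def.mpr h

lemma pairwise_pvBlocks (cs : List Char) (codes : List Int)
    (hmono : codes.Pairwise (· > ·)) (hb : ∀ c ∈ codes, 0 ≤ c ∧ c ≤ 127) :
    (pvBlocks cs codes).Pairwise (fun x y => y ≤ x) := by
  unfold pvBlocks
  rw [List.pairwise_flatten]
  constructor
  · intro l hl
    simp only [List.mem_map] at hl
    obtain ⟨code, _, rfl⟩ := hl
    exact List.pairwise_replicate.mpr (Or.inr le_rfl)
  · rw [List.pairwise_map]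
    refine hmono.imp_of_mem ?_
    intro c1 c2 h1 h2 hgt x hx y hy
    have hx' := List.eq_of_mem_replicate hx
    have hy' := List.eq_of_mem_replicate hy
    subst hx' hy'
    have hb1 := hb c1 h1; have hb2 := hb c2 h2
    apply char_le_of_toNat_le
    rw [toNat_charOfNat _ (by omega), toNat_charOfNat _ (by omega)]
    omega

-- the code list of B
def pvCodes : List Int := PySem.List.pyRange 127 (-1) (-1)

lemma pvCodes_mono : pvCodes.Pairwise (· > ·) := by
  unfold pvCodes
  rw [PySem.List.pyRange_neg_one_eq_reverse, List.pairwise_reverse]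
  exact PySem.List.pairwise_lt_pyRange_one 0 128

lemma pvCodes_mem (x : Int) : x ∈ pvCodes ↔ -1 < x ∧ x ≤ 127 := by
  unfold pvCodes; exact PySem.List.mem_pyRange_neg_one

lemma pvCodes_bounds : ∀ c ∈ pvCodes, 0 ≤ c ∧ c ≤ 127 := by
  intro c hc; rw [pvCodes_mem] at hc; omega

lemma pvCodes_chars_nodup : (pvCodes.map (fun code => Char.ofNat code.toNat)).Nodup := by
  have hnd : pvCodes.Nodup := pvCodes_mono.imp (fun h => ne_of_gt h)
  refine hnd.map_on ?_
  intro x hx y hy hxy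
  rw [pvCodes_mem] at hx hy
  have hx' := toNat_charOfNat x.toNat (by omega)
  have hy' := toNat_charOfNat y.toNat (by omega)
  have : x.toNat = y.toNat := by rw [← hx', ← hy', hxy]
  omega

lemma dom_toNat_lt {s : String} (hd : Dom_solution s) : ∀ c ∈ s.toList, c.toNat < 128 := by
  intro c hc
  have := List.all_eq_true.mp hd c hc
  simp [pvDomChar] at this; omega

lemma dom_mem_chars {s : String} (hd : Dom_solution s) {a : Char} (ha : a ∈ s.toList) :
    a ∈ pvCodes.map (fun code => Char.ofNat code.toNat) := by
  have hlt := dom_toNat_lt hd a ha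
  refine List.mem_map.mpr ⟨(a.toNat : Int), ?_, ?_⟩
  · rw [pvCodes_mem]; omega
  · simp [Char.ofNat_toNat]

lemma perm_pvBlocks {s : String} (hd : Dom_solution s) :
    (pvBlocks s.toList pvCodes).Perm s.toList := by
  rw [List.perm_iff_count]
  intro a
  rw [count_pvBlocks _ _ pvCodes_chars_nodup]
  by_cases hmem : a ∈ pvCodes.map (fun code => Char.ofNat code.toNat)
  · simp [hmem]
  · have : a ∉ s.toList := fun h => hmem (dom_mem_chars hd h)
    simp [hmem, List.count_eq_zero.mpr this]

lemma sorted_eq_pvBlocks {s : String} (hd : Dom_solution s) :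
    PySem.List.sorted s.toList (fun c => c) true = pvBlocks s.toList pvCodes := by
  have hperm : (PySem.List.sorted s.toList (fun c => c) true).Perm (pvBlocks s.toList pvCodes) :=
    (PySem.List.sorted_perm s.toList (fun c => c) true).trans (perm_pvBlocks hd).symm
  refine hperm.eq_of_pairwise (fun a b _ _ x y => le_antisymm y x) ?_ ?_
  · exact PySem.List.sorted_pairwise_rev s.toList (fun c => c)
  · exact pairwise_pvBlocks s.toList pvCodes pvCodes_mono pvCodes_bounds

-- B's output list is exactly the run blocks
lemma alt_eq_blocks {s : String} (hd : Dom_solution s) :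
    solution_alt s = String.ofList (pvBlocks s.toList pvCodes) := by
  unfold solution_alt
  show String.ofList (PySem.Chars.join []
      ((PySem.List.pyRange 127 (-1) (-1)).map
        (fun code => List.replicate ((pvCountFold s.toList (List.replicate 128 0)).getD code.toNat 0)
          (Char.ofNat code.toNat)))) = _
  rw [join_nil_flatten]
  congr 1
  unfold pvBlocks
  congr 1
  apply List.map_congr_left
  intro code hcode
  have hb := pvCodes_bounds code hcode
  have hk : code.toNat ≤ 127 := by omega
  rw [pvCountFold_zero s.toList (dom_toNat_lt hd) code.toNat hk]

-- ===== VERDICT (by name: the statement is the Claim_ definition above) =====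
theorem solution_spec : Claim_unchanged_solution := by
  intro s hd hnd
  unfold solution
  simp only []
  by_cases hany : s.toList.any (fun c => c == PySem.Chars.lowerChar c) = true
  · -- some character equals its lowercase: A sorts; its result is the same multiset sorted descending
    obtain ⟨a, ha, hpa⟩ := List.any_eq_true.mp hany
    rw [foldl_if_true _ _ _ _ ⟨a, ha, hpa⟩]
    rw [PySem.Chars.join_nil_singletons, sorted_eq_pvBlocks hd, alt_eq_blocks hd]
  · -- no such character: every char is uppercase, so s is empty (else D_ would hold)
    have hall : ∀ a ∈ s.toList, (a == PySem.Chars.lowerChar a) = false := by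
      intro a ha
      by_contra hne
      exact hany (List.any_eq_true.mpr ⟨a, ha, by simpa using hne⟩)
    have hupper : ∀ c ∈ s.toList, 65 ≤ c.toNat ∧ c.toNat ≤ 90 := by
      intro c hc
      have hdc : pvDomChar c = true := List.all_eq_true.mp hd c hc
      by_contra hcu
      have := (lowerChar_eq_iff c hdc).mpr hcu
      rw [hall c hc] at this
      exact Bool.false_ne_true this
    have hnil : s.toList = [] := by
      by_contra hne
      refine hnd ⟨hne, List.all_eq_true.mpr (fun c hc => ?_)⟩
      have := hupper c hc
      simp [this.1, this.2]
    rw [foldl_if_false _ _ _ _ hall, alt_eq_blocks hd]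
    have hblocks : pvBlocks s.toList pvCodes = [] :=
      List.Perm.eq_nil ((perm_pvBlocks hd).trans (hnil ▸ List.Perm.refl _))
    rw [hblocks]
    rfl

theorem solution_changed : Claim_changed_solution := by
  unfold Claim_changed_solution
  refine ⟨by decide, by decide, by decide, by decide, by decide⟩

theorem solution_tight : Claim_exact_solution := by
  intro s hd hD h
  obtain ⟨hne, hupperB⟩ := hD
  have hupper : ∀ c ∈ s.toList, 65 ≤ c.toNat ∧ c.toNat ≤ 90 := by
    intro c hc
    have := List.all_eq_true.mp hupperB c hc
    simpa using this
  -- A returns "": the guard never fires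
  have hall : ∀ a ∈ s.toList, (a == PySem.Chars.lowerChar a) = false := by
    intro a ha
    have hdc : pvDomChar a = true := List.all_eq_true.mp hd a ha
    by_contra hcontra
    have htrue : (a == PySem.Chars.lowerChar a) = true := by
      cases hb : (a == PySem.Chars.lowerChar a) <;> simp_all
    exact (lowerChar_eq_iff a hdc).mp htrue (hupper a ha)
  have hA : solution s = "" := by
    unfold solution
    simp only []
    rw [foldl_if_false _ _ _ _ hall]
    rfl
  -- B returns a permutation of s, which is nonempty
  have hB : (solution_alt s).toList.Perm s.toList := by
    rw [alt_eq_blocks hd]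
    simpa using perm_pvBlocks hd
  rw [hA] at h
  have : ([] : List Char).Perm s.toList := by
    have := hB
    rw [← h] at this
    simpa using this
  exact hne (this.symm.eq_nil)
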